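-- pv_equiv track=rewrite | github.com/MasterSummer/height | heightnet_repro/src/heightnet/datasets.py | _frame_retry_order
-- ===== SOURCE A (Python) =====
-- from typing import Dict, List, Tuple
--
-- def _frame_retry_order(frame_idx: int, start: int, end: int) -> List[int]:
--     if end < start:
--         raise ValueError(f"invalid frame range: [{start}, {end}]")
--     out = [frame_idx]
--     max_offset = max(frame_idx - start, end - frame_idx)
--     for offset in range(1, max_offset + 1):
--         right = frame_idx + offset
--         left = frame_idx - offset
--         if right <= end:
--             out.append(right)
--         if left >= start:
--             out.append(left)
--     return out
-- ===== SOURCE B (Python) =====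
-- def _frame_retry_order(frame_idx: int, start: int, end: int) -> list:
--     if end < start:
--         raise ValueError(f"invalid frame range: [{start}, {end}]")
--     candidates = [frame_idx] + list(range(start, frame_idx)) + list(range(frame_idx + 1, end + 1))
--     # rank by distance from frame_idx, with the right neighbour before the left one
--     return sorted(candidates, key=lambda x: 2 * abs(x - frame_idx) + (x < frame_idx))
-- ===== Notes on version B (the rewrite author's own statement) =====
-- stated objective: alternative
-- what changed: Replaces the per-offset loop with explicit appends by collecting all candidate frames into one list and sorting it with an explicit distance-from-center key (2*abs(x-frame_idx) + (x<frame_idx)), so the center-out right-before-left order comes from the key, not from loop structure.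
import Mathlib
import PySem

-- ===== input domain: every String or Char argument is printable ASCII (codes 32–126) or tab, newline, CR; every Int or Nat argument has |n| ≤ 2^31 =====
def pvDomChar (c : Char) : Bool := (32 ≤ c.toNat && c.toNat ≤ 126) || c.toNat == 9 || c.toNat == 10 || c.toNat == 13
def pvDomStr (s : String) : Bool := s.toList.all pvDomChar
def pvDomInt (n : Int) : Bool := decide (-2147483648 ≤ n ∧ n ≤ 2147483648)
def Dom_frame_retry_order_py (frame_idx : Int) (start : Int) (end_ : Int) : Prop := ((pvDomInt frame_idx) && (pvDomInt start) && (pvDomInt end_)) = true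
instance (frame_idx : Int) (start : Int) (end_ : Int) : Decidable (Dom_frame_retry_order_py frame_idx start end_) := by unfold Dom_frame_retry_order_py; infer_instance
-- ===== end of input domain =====

-- B drops the offset loop entirely: it collects all candidate frames in one list and
-- sorts them by an explicit distance-from-center key (alternative algorithm, O(n log n)).

-- ===== PORT A =====
def frame_retry_order_py (frame_idx : Int) (start : Int) (end_ : Int) : List Int :=
  if end_ < start then []  -- Python raises ValueError here; excluded by Pre_
  else
    let max_offset := max (frame_idx - start) (end_ - frame_idx)
    (PySem.List.pyRange 1 (max_offset + 1) 1).foldl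
      (fun out offset =>
        let right := frame_idx + offset
        let left := frame_idx - offset
        let out := if right ≤ end_ then out ++ [right] else out
        if start ≤ left then out ++ [left] else out)
      [frame_idx]

-- ===== PORT B =====
def frame_retry_order_py_alt (frame_idx : Int) (start : Int) (end_ : Int) : List Int :=
  if end_ < start then []  -- Python raises ValueError here; excluded by Pre_
  else
    let candidates := [frame_idx] ++ PySem.List.pyRange start frame_idx 1
                        ++ PySem.List.pyRange (frame_idx + 1) (end_ + 1) 1
    PySem.List.sorted candidates
      (fun x => 2 * |x - frame_idx| + (if x < frame_idx then 1 else 0)) false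

-- ===== PRECONDITION & SPEC =====
-- Pre_ excludes exactly end < start, where the Python A (and B) raise ValueError.
def Pre_frame_retry_order_py (frame_idx : Int) (start : Int) (end_ : Int) : Prop := start ≤ end_
instance (frame_idx : Int) (start : Int) (end_ : Int) : Decidable (Pre_frame_retry_order_py frame_idx start end_) := by unfold Pre_frame_retry_order_py; infer_instance
def pvWitness_frame_retry_order_py : Int × Int × Int := (2, 0, 5)

def Spec_frame_retry_order_py (frame_idx : Int) (start : Int) (end_ : Int) (out : List Int) : Prop := out = frame_retry_order_py_alt frame_idx start end_
instance (frame_idx : Int) (start : Int) (end_ : Int) (out : List Int) : Decidable (Spec_frame_retry_order_py frame_idx start end_ out) := by unfold Spec_frame_retry_order_py; infer_instance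

-- ===== CLAIM (what is proved, stated in full; the proofs are below) =====
def Claim_equal_frame_retry_order_py : Prop := ∀ (frame_idx : Int) (start : Int) (end_ : Int), Dom_frame_retry_order_py frame_idx start end_ → Pre_frame_retry_order_py frame_idx start end_ → Spec_frame_retry_order_py frame_idx start end_ (frame_retry_order_py frame_idx start end_)

-- ===== LEMMAS AND PROOFS =====

-- B's sort key, abbreviated for the proofs.
def pvKey (fi x : Int) : Int := 2 * |x - fi| + (if x < fi then 1 else 0)

-- Canonical center-out list of offsets s, s+1, …, s+n-1, right arm before left arm.
def pvMix (fi start end_ : Int) (s : Int) : Nat → List Int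
  | 0 => []
  | n+1 => (if fi + s ≤ end_ then [fi + s] else []) ++
           (if start ≤ fi - s then [fi - s] else []) ++
           pvMix fi start end_ (s + 1) n

-- A's loop over offsets [s, s+n) equals acc ++ pvMix.
theorem pvA_fold (fi start end_ : Int) : ∀ (n : Nat) (s : Int) (acc : List Int),
    (PySem.List.pyRange s (s + n) 1).foldl
      (fun out offset =>
        if start ≤ fi - offset then
          (if fi + offset ≤ end_ then out ++ [fi + offset] else out) ++ [fi - offset]
        else if fi + offset ≤ end_ then out ++ [fi + offset] else out)
      acc
    = acc ++ pvMix fi start end_ s n := by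
  intro n
  induction n with
  | zero =>
    intro s acc
    rw [show s + ((0 : Nat) : Int) = s by simp, PySem.List.pyRange_one_eq_nil le_rfl]
    simp [pvMix]
  | succ m ih =>
    intro s acc
    rw [show (((m + 1 : Nat)) : Int) = (m : Int) + 1 by push_cast; ring,
        show s + ((m : Int) + 1) = (s + 1) + (m : Int) by ring]
    rw [PySem.List.pyRange_one_cons (show s < (s + 1) + (m : Int) by omega)]
    simp only [List.foldl_cons]
    rw [ih (s + 1)]
    simp only [pvMix]
    split_ifs <;> simp

-- interleave helper (proof-only).
def pvIlv : List Int → List Int → List Int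
  | [], ys => ys
  | x :: xs, [] => x :: xs
  | x :: xs, y :: ys => x :: y :: pvIlv xs ys

theorem pvIlv_nil_right : ∀ xs : List Int, pvIlv xs [] = xs := by
  intro xs; cases xs <;> rfl

theorem pvIlv_perm : ∀ xs ys : List Int, (pvIlv xs ys).Perm (xs ++ ys) := by
  intro xs
  induction xs with
  | nil => intro ys; simp [pvIlv]
  | cons x xs ih =>
    intro ys
    cases ys with
    | nil => simp [pvIlv]
    | cons y ys =>
      simp only [pvIlv, List.cons_append]
      exact List.Perm.cons x (((ih ys).cons y).trans List.perm_middle.symm)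

-- pvMix equals the interleave of the two pyRange arms, once n reaches past both bounds.
theorem pvMix_eq_ilv (fi start end_ : Int) : ∀ (n : Nat) (s : Int),
    fi - start < s + n → end_ - fi < s + n →
    pvMix fi start end_ s n
      = pvIlv (PySem.List.pyRange (fi + s) (end_ + 1) 1)
              (PySem.List.pyRange (fi - s) (start - 1) (-1)) := by
  intro n
  induction n with
  | zero =>
    intro s h1 h2
    rw [PySem.List.pyRange_one_eq_nil (by omega), PySem.List.pyRange_neg_one_eq_nil (by omega)]
    simp [pvMix, pvIlv]
  | succ m ih =>
    intro s h1 h2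
    have h1' : fi - start < (s + 1) + (m : Int) := by push_cast at h1; omega
    have h2' : end_ - fi < (s + 1) + (m : Int) := by push_cast at h2; omega
    by_cases hr : fi + s ≤ end_ <;> by_cases hl : start ≤ fi - s
    · rw [PySem.List.pyRange_one_cons (by omega), PySem.List.pyRange_neg_one_cons (by omega)]
      simp only [pvMix, if_pos hr, if_pos hl, pvIlv]
      rw [ih (s + 1) h1' h2',
          show fi + s + 1 = fi + (s + 1) by ring, show fi - s - 1 = fi - (s + 1) by ring]
      simp
    · rw [PySem.List.pyRange_one_cons (by omega), PySem.List.pyRange_neg_one_eq_nil (by omega)]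
      simp only [pvMix, if_pos hr, if_neg hl, pvIlv]
      rw [ih (s + 1) h1' h2', PySem.List.pyRange_neg_one_eq_nil (by omega),
          show fi + s + 1 = fi + (s + 1) by ring]
      simp [pvIlv_nil_right]
    · rw [PySem.List.pyRange_one_eq_nil (by omega), PySem.List.pyRange_neg_one_cons (by omega)]
      simp only [pvMix, if_neg hr, if_pos hl, pvIlv]
      rw [ih (s + 1) h1' h2', PySem.List.pyRange_one_eq_nil (by omega),
          show fi - s - 1 = fi - (s + 1) by ring]
      simp [pvIlv]
    · rw [PySem.List.pyRange_one_eq_nil (by omega), PySem.List.pyRange_neg_one_eq_nil (by omega)]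
      simp only [pvMix, if_neg hr, if_neg hl]
      rw [ih (s + 1) h1' h2', PySem.List.pyRange_one_eq_nil (by omega),
          PySem.List.pyRange_neg_one_eq_nil (by omega)]
      simp [pvIlv]

theorem pvKey_right (fi s : Int) (hs : 0 ≤ s) : pvKey fi (fi + s) = 2 * s := by
  unfold pvKey
  rw [show fi + s - fi = s by ring, abs_of_nonneg hs, if_neg (by omega)]
  ring

theorem pvKey_left (fi s : Int) (hs : 1 ≤ s) : pvKey fi (fi - s) = 2 * s + 1 := by
  unfold pvKey
  rw [show fi - s - fi = -s by ring, abs_neg, abs_of_nonneg (by omega), if_pos (by omega)]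

-- pvMix is strictly increasing under pvKey, with keys bounded below by 2*s.
theorem pvMix_keys (fi start end_ : Int) : ∀ (n : Nat) (s : Int), 1 ≤ s →
    (pvMix fi start end_ s n).Pairwise (fun a b => pvKey fi a < pvKey fi b) ∧
    (∀ x ∈ pvMix fi start end_ s n, 2 * s ≤ pvKey fi x) := by
  intro n
  induction n with
  | zero => intro s _; simp [pvMix]
  | succ m ih =>
    intro s hs
    obtain ⟨hp, hb⟩ := ih (s + 1) (by omega)
    have hkr := pvKey_right fi s (by omega)
    have hkl := pvKey_left fi s hs
    have hrest : ∀ x ∈ pvMix fi start end_ (s + 1) m, 2 * s + 1 < pvKey fi x := by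
      intro x hx; have := hb x hx; omega
    constructor
    · simp only [pvMix]
      split_ifs with hr hl hl
      · simp only [List.cons_append]
        refine List.pairwise_cons.mpr ⟨?_, List.pairwise_cons.mpr ⟨?_, hp⟩⟩
        · intro x hx
          rcases List.mem_cons.mp hx with h | h
          · rw [h, hkr, hkl]; omega
          · have := hrest x h; omega
        · intro x hx; have := hrest x hx; omega
      · simp only [List.singleton_append]
        refine List.pairwise_cons.mpr ⟨?_, hp⟩
        intro x hx; have := hrest x hx; omega
      · simp only [List.nil_append, List.singleton_append]
        refine List.pairwise_cons.mpr ⟨?_, hp⟩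
        intro x hx; have := hrest x hx; omega
      · simpa using hp
    · intro x hx
      simp only [pvMix, List.mem_append] at hx
      rcases hx with (hx | hx) | hx
      · have hx' : x = fi + s := by split_ifs at hx <;> simp_all
        rw [hx', hkr]
      · have hx' : x = fi - s := by split_ifs at hx <;> simp_all
        rw [hx', hkl]; omega
      · have := hb x hx; omega

-- ===== VERDICT (by name: the statement is the Claim_ definition above) =====
theorem frame_retry_order_py_spec : Claim_equal_frame_retry_order_py := by
  intro fi start end_ _hdom hpre
  unfold Pre_frame_retry_order_py at hpre
  unfold Spec_frame_retry_order_py frame_retry_order_py frame_retry_order_py_alt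
  rw [if_neg (by omega), if_neg (by omega)]
  dsimp only
  set n := (max (fi - start) (end_ - fi)).toNat with hn
  rw [show max (fi - start) (end_ - fi) + 1 = 1 + ((n : Nat) : Int) by omega]
  rw [pvA_fold fi start end_ n 1 [fi]]
  have hmix := pvMix_eq_ilv fi start end_ n 1 (by omega) (by omega)
  have hL : PySem.List.pyRange (fi - 1) (start - 1) (-1)
      = (PySem.List.pyRange start fi 1).reverse := by
    rw [PySem.List.pyRange_neg_one_eq_reverse]
    norm_num
  have hperm : ([fi] ++ pvMix fi start end_ 1 n).Perm
      ([fi] ++ PySem.List.pyRange start fi 1 ++ PySem.List.pyRange (fi + 1) (end_ + 1) 1) := by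
    rw [hmix, List.append_assoc]
    simp only [List.singleton_append]
    refine List.Perm.cons fi ?_
    refine (pvIlv_perm _ _).trans ?_
    refine List.Perm.trans ?_ List.perm_append_comm
    rw [hL]
    exact List.Perm.append_left _ (List.reverse_perm _)
  have hpw : ([fi] ++ pvMix fi start end_ 1 n).Pairwise
      (fun a b => pvKey fi a < pvKey fi b) := by
    obtain ⟨hp, hb⟩ := pvMix_keys fi start end_ n 1 le_rfl
    simp only [List.singleton_append, List.pairwise_cons]
    refine ⟨fun x hx => ?_, hp⟩
    have h1 := hb x hx
    have h0 : pvKey fi fi = 0 := by unfold pvKey; simp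
    omega
  have hk : (fun x => 2 * |x - fi| + if x < fi then 1 else 0) = pvKey fi := by
    funext x; rfl
  rw [hk]
  exact (PySem.List.sorted_eq_of_perm_of_pairwise_lt _ _ (pvKey fi) hperm hpw).symm
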